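-- pv_equiv track=rewrite | github.com/tmdgh1592/PROBLEM_SOLVE | PROGRAMMERS/KAKAO_CODING_TEST_2022/5.py | solution
-- ===== SOURCE A (Python) =====
-- def solution(rc, operations):
--     for op in operations:
--         if op == "ShiftRow":
--             prev_temp = rc[0]
--             now_temp = rc[0]
--             for i in range(1, len(rc)):
--                 now_temp = rc[i]
--                 rc[i] = prev_temp
--                 prev_temp = now_temp
--                 if i == len(rc)-1:
--                     rc[0] = prev_temp
--         else:
--             garo, sero = len(rc[0]), len(rc)
--             # ran = (garo*sero) - ((garo-1)*(sero-1))  # 반복할 횟수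
--             prev_temp = rc[0][0]
--             now_temp = rc[0][0]
--             i, j = 0, 1
--             direction = 0
--
--             while direction != 4:
--                 now_temp = rc[i][j]
--                 rc[i][j] = prev_temp
--                 prev_temp = now_temp
--                 if direction == 0:
--                     j += 1
--                 elif direction == 1:
--                     i += 1
--                 elif direction == 2:
--                     j -= 1
--                 else:
--                     i -= 1
--
--                 if j == garo:
--                     j -= 1
--                     i += 1
--                     direction += 1
--                 elif i == sero:
--                     i -= 1
--                     j -= 1
--                     direction += 1
--                 elif j == -1:
--                     j = 0
--                     i = sero - 2
--                     direction += 1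
--                 elif i == -1:
--                     direction += 1
--                     break
--
--     return rc
-- ===== SOURCE B (Python) =====
-- def solution(rc, operations):
--     for op in operations:
--         if op == "ShiftRow":
--             rc[:] = [rc[-1]] + rc[:-1]
--         else:
--             g, s = len(rc[0]), len(rc)
--             coords = [(0, j) for j in range(g)] \
--                    + [(i, g - 1) for i in range(1, s)] \
--                    + [(s - 1, j) for j in range(g - 2, -1, -1)] \
--                    + [(i, 0) for i in range(s - 2, 0, -1)]
--             vals = [rc[i][j] for (i, j) in coords]
--             rotated = [vals[-1]] + vals[:-1]
--             for (i, j), v in zip(coords, rotated):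
--                 rc[i][j] = v
--     return rc
-- ===== Notes on version B (the rewrite author's own statement) =====
-- stated objective: simpler
-- what changed: A's stateful prev/now carry chains and 4-direction while-walk are replaced by a one-line cyclic row shift and, for the rotation, by building the clockwise border-coordinate list once, reading all ring values, and writing them back rotated by one in a separate pass.
import Mathlib
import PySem

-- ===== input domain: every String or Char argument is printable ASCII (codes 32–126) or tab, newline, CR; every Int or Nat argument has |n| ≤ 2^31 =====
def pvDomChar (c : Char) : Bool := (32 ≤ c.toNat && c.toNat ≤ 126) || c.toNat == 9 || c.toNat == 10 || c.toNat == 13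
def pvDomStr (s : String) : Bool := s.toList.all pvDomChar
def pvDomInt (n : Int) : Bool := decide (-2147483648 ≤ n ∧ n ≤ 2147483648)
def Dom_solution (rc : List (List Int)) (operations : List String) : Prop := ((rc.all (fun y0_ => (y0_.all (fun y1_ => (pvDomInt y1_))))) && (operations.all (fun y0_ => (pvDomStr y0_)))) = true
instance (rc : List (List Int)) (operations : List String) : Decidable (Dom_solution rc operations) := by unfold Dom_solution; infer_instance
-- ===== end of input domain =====

-- B replaces A's stateful prev/now carry chains with a one-line cyclic row shift and a
-- read-all / write-back-rotated pass over the precomputed border ring (simpler decomposition).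
-- Both A and B mutate rc in place in Python; the equivalence proved here is about the returned value.

-- ===== PORT A =====
-- shared Python primitives: rc[i][j] read and write (total forms; Pre_ keeps indices in range)
def pyGetCell (m : List (List Int)) (i j : Int) : Int :=
  PySem.List.pyGetD (PySem.List.pyGetD m i []) j 0

def pySetCell (m : List (List Int)) (i j : Int) (v : Int) : List (List Int) :=
  PySem.List.pySetD m i (PySem.List.pySetD (PySem.List.pyGetD m i []) j v)

-- the ShiftRow branch of A: carry prev_temp/now_temp down the rows
def shiftRowA (rc : List (List Int)) : List (List Int) :=
  let prev := PySem.List.pyGetD rc 0 []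
  ((PySem.List.pyRange 1 (PySem.List.len rc) 1).foldl
    (fun (st : List (List Int) × List Int) i =>
      let now := PySem.List.pyGetD st.1 i []
      let m := PySem.List.pySetD st.1 i st.2
      let m := if i = PySem.List.len rc - 1 then PySem.List.pySetD m 0 now else m
      (m, now))
    (rc, prev)).1

-- the while-loop of A's rotate branch (fuel only bounds the loop; the walk visits the
-- border ring once, fewer than 2*(garo+sero) steps, so fuel is never exhausted on admitted inputs)
def rotateLoopA (garo sero : Int) : Nat → List (List Int) → Int → Int → Int → Int → List (List Int)
  | 0, m, _, _, _, _ => m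
  | fuel+1, m, i, j, prev, dir =>
    if dir = 4 then m else
      let now := pyGetCell m i j
      let m' := pySetCell m i j prev
      let i' := if dir = 0 then i else if dir = 1 then i + 1 else if dir = 2 then i else i - 1
      let j' := if dir = 0 then j + 1 else if dir = 1 then j else if dir = 2 then j - 1 else j
      if j' = garo then rotateLoopA garo sero fuel m' (i' + 1) (j' - 1) now (dir + 1)
      else if i' = sero then rotateLoopA garo sero fuel m' (i' - 1) (j' - 1) now (dir + 1)
      else if j' = -1 then rotateLoopA garo sero fuel m' (sero - 2) 0 now (dir + 1)
      else if i' = -1 then m'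
      else rotateLoopA garo sero fuel m' i' j' now dir

def rotateA (rc : List (List Int)) : List (List Int) :=
  let garo := PySem.List.len (PySem.List.pyGetD rc 0 [])
  let sero := PySem.List.len rc
  let prev := pyGetCell rc 0 0
  rotateLoopA garo sero (2 * (garo + sero)).toNat rc 0 1 prev 0

def solution (rc : List (List Int)) (operations : List String) : List (List Int) :=
  operations.foldl (fun m op => if op = "ShiftRow" then shiftRowA m else rotateA m) rc

-- ===== PORT B =====
-- the ShiftRow branch of B:  rc[:] = [rc[-1]] + rc[:-1]
def shiftRowB (rc : List (List Int)) : List (List Int) :=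
  PySem.List.pyGetD rc (-1) [] :: PySem.List.slice rc none (some (-1))

-- border ring coordinates, clockwise from the top-left corner
def ringCoords (g s : Int) : List (Int × Int) :=
  (PySem.List.pyRange 0 g 1).map (fun j => ((0 : Int), j))
  ++ (PySem.List.pyRange 1 s 1).map (fun i => (i, g - 1))
  ++ (PySem.List.pyRange (g - 2) (-1) (-1)).map (fun j => (s - 1, j))
  ++ (PySem.List.pyRange (s - 2) 0 (-1)).map (fun i => (i, (0 : Int)))

-- the rotate branch of B: read the ring, write it back rotated by one
def rotateB (rc : List (List Int)) : List (List Int) :=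
  let g := PySem.List.len (PySem.List.pyGetD rc 0 [])
  let s := PySem.List.len rc
  let coords := ringCoords g s
  let vals := coords.map (fun c => pyGetCell rc c.1 c.2)
  let rotated := PySem.List.pyGetD vals (-1) 0 :: PySem.List.slice vals none (some (-1))
  (coords.zip rotated).foldl (fun m cv => pySetCell m cv.1.1 cv.1.2 cv.2) rc

def solution_alt (rc : List (List Int)) (operations : List String) : List (List Int) :=
  operations.foldl (fun m op => if op = "ShiftRow" then shiftRowB m else rotateB m) rc

-- ===== PRECONDITION & SPEC =====
-- Pre_ excludes the inputs on which A raises IndexError: an empty rc with any operation, and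
-- rotate operations on matrices with fewer than 2 rows or columns or with a row shorter than
-- the first row's width; rectangularity is the natural closed-form guarantee (A also happens to
-- return on some ragged matrices whose extra-long rows survive the walk — B agrees there).
def Pre_solution (rc : List (List Int)) (operations : List String) : Prop :=
  (operations ≠ [] → rc ≠ []) ∧
  ((∃ op ∈ operations, op ≠ "ShiftRow") →
    2 ≤ rc.length ∧ 2 ≤ rc.headI.length ∧ ∀ row ∈ rc, row.length = rc.headI.length)

instance (rc : List (List Int)) (operations : List String) : Decidable (Pre_solution rc operations) := by
  unfold Pre_solution; infer_instance

def pvWitness_solution : List (List Int) × List String :=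
  ([[1, 2, 3], [4, 5, 6]], ["ShiftRow", "Rotate"])

def Spec_solution (rc : List (List Int)) (operations : List String) (out : List (List Int)) : Prop := out = solution_alt rc operations
instance (rc : List (List Int)) (operations : List String) (out : List (List Int)) : Decidable (Spec_solution rc operations out) := by unfold Spec_solution; infer_instance

-- ===== CLAIM (what is proved, stated in full; the proofs are below) =====
def Claim_equal_solution : Prop := ∀ (rc : List (List Int)) (operations : List String), Dom_solution rc operations → Pre_solution rc operations → Spec_solution rc operations (solution rc operations)

-- ===== LEMMAS AND PROOFS =====

-- ---- proof-side helpers ----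

-- the index path of A's while loop (same control flow, coordinates only)
def walkA (garo sero : Int) : Nat → Int → Int → Int → List (Int × Int)
  | 0, _, _, _ => []
  | fuel+1, i, j, dir =>
    if dir = 4 then [] else
      let i' := if dir = 0 then i else if dir = 1 then i + 1 else if dir = 2 then i else i - 1
      let j' := if dir = 0 then j + 1 else if dir = 1 then j else if dir = 2 then j - 1 else j
      if j' = garo then (i, j) :: walkA garo sero fuel (i' + 1) (j' - 1) (dir + 1)
      else if i' = sero then (i, j) :: walkA garo sero fuel (i' - 1) (j' - 1) (dir + 1)
      else if j' = -1 then (i, j) :: walkA garo sero fuel (sero - 2) 0 (dir + 1)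
      else if i' = -1 then [(i, j)]
      else (i, j) :: walkA garo sero fuel i' j' dir

-- carry-chain writing along a path (reads before writes, Python style)
def ringWrite (m : List (List Int)) : List (Int × Int) → Int → List (List Int)
  | [], _ => m
  | c :: t, prev => ringWrite (pySetCell m c.1 c.2 prev) t (pyGetCell m c.1 c.2)

-- simultaneous-assignment form
def pairsFold (m : List (List Int)) (pairs : List ((Int × Int) × Int)) : List (List Int) :=
  pairs.foldl (fun m cv => pySetCell m cv.1.1 cv.1.2 cv.2) m

lemma rotateLoopA_eq_ringWrite (garo sero : Int) (fuel : Nat) :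
    ∀ (m : List (List Int)) (i j prev dir : Int),
      rotateLoopA garo sero fuel m i j prev dir
        = ringWrite m (walkA garo sero fuel i j dir) prev := by
  induction fuel with
  | zero => intro m i j prev dir; simp [rotateLoopA, walkA, ringWrite]
  | succ f ih =>
    intro m i j prev dir
    simp only [rotateLoopA, walkA]
    split_ifs <;> simp [ringWrite, ih]

-- the four straight segments of A's walk (top, right, bottom, left)
lemma walk_seg0 (g s : Int) (hs : 2 ≤ s) :
    ∀ (k f : Nat), ((k : Int) + 1 ≤ g - 1) →
      walkA g s ((k + 1) + f) 0 (g - ((k : Int) + 1)) 0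
        = (PySem.List.pyRange (g - ((k : Int) + 1)) g 1).map (fun j => ((0 : Int), j))
          ++ walkA g s f 1 (g - 1) 1 := by
  intro k
  induction k with
  | zero =>
    intro f hk
    rw [show (0 + 1) + f = f + 1 from by omega]
    simp only [walkA]
    norm_num
    rw [PySem.List.pyRange_one_cons (by omega), PySem.List.pyRange_one_eq_nil (by omega)]
    simp
  | succ k ih =>
    intro f hk
    push_cast at hk
    rw [show (k + 1 + 1) + f = ((k + 1) + f) + 1 from by omega]
    simp only [walkA]
    push_cast
    split_ifs <;> try omega
    case _ =>
      have e1 : g - ((k:Int) + 1 + 1) + 1 = g - ((k:Int) + 1) := by ring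
      rw [e1, ih f (by omega)]
      have e2 : PySem.List.pyRange (g - ((k:Int) + 1 + 1)) g 1
          = (g - ((k:Int) + 1 + 1)) :: PySem.List.pyRange (g - ((k:Int) + 1)) g 1 := by
        rw [PySem.List.pyRange_one_cons (by omega)]
        congr 2
      rw [e2]
      simp

lemma walk_seg1 (g s : Int) (hg : 2 ≤ g) :
    ∀ (k f : Nat), ((k : Int) + 1 ≤ s - 1) →
      walkA g s ((k + 1) + f) (s - ((k : Int) + 1)) (g - 1) 1
        = (PySem.List.pyRange (s - ((k : Int) + 1)) s 1).map (fun i => (i, g - 1))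
          ++ walkA g s f (s - 1) (g - 2) 2 := by
  intro k
  induction k with
  | zero =>
    intro f hk
    rw [show (0 + 1) + f = f + 1 from by omega]
    simp only [walkA]
    norm_num
    rw [PySem.List.pyRange_one_cons (by omega), PySem.List.pyRange_one_eq_nil (by omega)]
    simp
    congr 1
    omega
  | succ k ih =>
    intro f hk
    push_cast at hk
    rw [show (k + 1 + 1) + f = ((k + 1) + f) + 1 from by omega]
    simp only [walkA]
    push_cast
    split_ifs <;> try omega
    case _ =>
      have e1 : s - ((k:Int) + 1 + 1) + 1 = s - ((k:Int) + 1) := by ring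
      rw [e1, ih f (by omega)]
      have e2 : PySem.List.pyRange (s - ((k:Int) + 1 + 1)) s 1
          = (s - ((k:Int) + 1 + 1)) :: PySem.List.pyRange (s - ((k:Int) + 1)) s 1 := by
        rw [PySem.List.pyRange_one_cons (by omega)]
        congr 2
      rw [e2]
      simp

lemma walk_seg2 (g s : Int) (hs : 2 ≤ s) :
    ∀ (k f : Nat), ((k : Int) + 1 ≤ g - 1) →
      walkA g s ((k + 1) + f) (s - 1) ((k : Int)) 2
        = (PySem.List.pyRange ((k : Int)) (-1) (-1)).map (fun j => (s - 1, j))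
          ++ walkA g s f (s - 2) 0 3 := by
  intro k
  induction k with
  | zero =>
    intro f hk
    rw [show (0 + 1) + f = f + 1 from by omega]
    simp only [walkA]
    norm_num
    split_ifs <;> try omega
    case _ =>
      rw [PySem.List.pyRange_neg_one_cons (by omega), PySem.List.pyRange_neg_one_eq_nil (by omega)]
      simp
  | succ k ih =>
    intro f hk
    push_cast at hk
    rw [show (k + 1 + 1) + f = ((k + 1) + f) + 1 from by omega]
    simp only [walkA]
    push_cast
    split_ifs <;> try omega
    case _ =>
      have e1 : (k:Int) + 1 - 1 = (k:Int) := by ring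
      rw [e1, ih f (by omega)]
      have e2 : PySem.List.pyRange ((k:Int) + 1) (-1) (-1)
          = ((k:Int) + 1) :: PySem.List.pyRange ((k:Int)) (-1) (-1) := by
        rw [PySem.List.pyRange_neg_one_cons (by omega)]
        congr 2
      rw [e2]
      simp

lemma walk_seg3 (g s : Int) (hg : 2 ≤ g) :
    ∀ (k f : Nat), ((k : Int) + 1 ≤ s - 1) →
      walkA g s ((k + 1) + f) ((k : Int)) 0 3
        = (PySem.List.pyRange ((k : Int)) (-1) (-1)).map (fun i => (i, (0 : Int))) := by
  intro k
  induction k with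
  | zero =>
    intro f hk
    rw [show (0 + 1) + f = f + 1 from by omega]
    simp only [walkA]
    norm_num
    split_ifs <;> try omega
    case _ =>
      rw [PySem.List.pyRange_neg_one_cons (by omega), PySem.List.pyRange_neg_one_eq_nil (by omega)]
      simp
  | succ k ih =>
    intro f hk
    push_cast at hk
    rw [show (k + 1 + 1) + f = ((k + 1) + f) + 1 from by omega]
    simp only [walkA]
    push_cast
    split_ifs <;> try omega
    case _ =>
      have e1 : (k:Int) + 1 - 1 = (k:Int) := by ring
      rw [e1, ih f (by omega)]
      have e2 : PySem.List.pyRange ((k:Int) + 1) (-1) (-1)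
          = ((k:Int) + 1) :: PySem.List.pyRange ((k:Int)) (-1) (-1) := by
        rw [PySem.List.pyRange_neg_one_cons (by omega)]
        congr 2
      rw [e2]
      simp

-- the full path of A's walk: the border ring, clockwise, starting at (0,1) and ending at (0,0)
def ringPathA (g s : Int) : List (Int × Int) :=
  (PySem.List.pyRange 1 g 1).map (fun j => ((0 : Int), j))
  ++ ((PySem.List.pyRange 1 s 1).map (fun i => (i, g - 1))
  ++ ((PySem.List.pyRange (g - 2) (-1) (-1)).map (fun j => (s - 1, j))
  ++ (PySem.List.pyRange (s - 2) (-1) (-1)).map (fun i => (i, (0 : Int)))))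

lemma walkA_full (g s : Int) (hg : 2 ≤ g) (hs : 2 ≤ s) :
    walkA g s (2 * (g + s)).toNat 0 1 0 = ringPathA g s := by
  have hk0 : ((g - 2).toNat : Int) + 1 = g - 1 := by omega
  have hk1 : ((s - 2).toNat : Int) + 1 = s - 1 := by omega
  have hF : (2 * (g + s)).toNat
      = ((g - 2).toNat + 1) + (((s - 2).toNat + 1) + (((g - 2).toNat + 1) + (((s - 2).toNat + 1) + 4))) := by
    omega
  have e0 := walk_seg0 g s hs (g - 2).toNat
    (((s - 2).toNat + 1) + (((g - 2).toNat + 1) + (((s - 2).toNat + 1) + 4))) (by omega)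
  have e1 := walk_seg1 g s hg (s - 2).toNat (((g - 2).toNat + 1) + (((s - 2).toNat + 1) + 4)) (by omega)
  have e2 := walk_seg2 g s hs (g - 2).toNat (((s - 2).toNat + 1) + 4) (by omega)
  have e3 := walk_seg3 g s hg (s - 2).toNat 4 (by omega)
  rw [show g - (((g - 2).toNat : Int) + 1) = 1 from by omega] at e0
  rw [show s - (((s - 2).toNat : Int) + 1) = 1 from by omega] at e1
  rw [show ((g - 2).toNat : Int) = g - 2 from by omega] at e2
  rw [show ((s - 2).toNat : Int) = s - 2 from by omega] at e3
  rw [hF, e0, e1, e2, e3, ringPathA]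

lemma pyGetCell_nonneg (m : List (List Int)) (i j : Int) (hi : 0 ≤ i) (hj : 0 ≤ j) :
    pyGetCell m i j = (m[i.toNat]?.getD [])[j.toNat]?.getD 0 := by
  simp [pyGetCell, PySem.List.pyGetD_of_nonneg, hi, hj, List.getD_eq_getElem?_getD]

lemma pySetCell_nonneg (m : List (List Int)) (i j : Int) (v : Int) (hi : 0 ≤ i) (hj : 0 ≤ j) :
    pySetCell m i j v = m.set i.toNat ((m[i.toNat]?.getD []).set j.toNat v) := by
  simp [pySetCell, PySem.List.pySetD_of_nonneg, PySem.List.pyGetD_of_nonneg, hi, hj,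
    List.getD_eq_getElem?_getD]

lemma getCell_setCell_ne (m : List (List Int)) (i j i' j' v : Int)
    (hi : 0 ≤ i) (hj : 0 ≤ j) (hi' : 0 ≤ i') (hj' : 0 ≤ j') (hne : (i, j) ≠ (i', j')) :
    pyGetCell (pySetCell m i' j' v) i j = pyGetCell m i j := by
  rw [pySetCell_nonneg m i' j' v hi' hj', pyGetCell_nonneg _ i j hi hj, pyGetCell_nonneg m i j hi hj]
  by_cases hrow : i = i'
  · subst hrow
    have hcol : j.toNat ≠ j'.toNat := by
      intro h
      exact hne (by simp [Prod.ext_iff]; omega)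
    by_cases hlen : i.toNat < m.length
    · rw [List.getElem?_set_self hlen, Option.getD_some, List.getElem?_set_ne (Ne.symm hcol)]
    · rw [List.set_eq_of_length_le (by omega)]
  · rw [List.getElem?_set_ne (by omega)]

lemma setCell_comm (m : List (List Int)) (i j i' j' v v' : Int)
    (hi : 0 ≤ i) (hj : 0 ≤ j) (hi' : 0 ≤ i') (hj' : 0 ≤ j') (hne : (i, j) ≠ (i', j')) :
    pySetCell (pySetCell m i j v) i' j' v' = pySetCell (pySetCell m i' j' v') i j v := by
  rw [pySetCell_nonneg m i j v hi hj, pySetCell_nonneg _ i' j' v' hi' hj',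
      pySetCell_nonneg m i' j' v' hi' hj', pySetCell_nonneg _ i j v hi hj]
  by_cases hrow : i = i'
  · subst hrow
    have hcol : j.toNat ≠ j'.toNat := by
      intro h
      exact hne (by simp [Prod.ext_iff]; omega)
    by_cases hlen : i.toNat < m.length
    · rw [List.getElem?_set_self hlen, Option.getD_some, List.getElem?_set_self hlen,
         Option.getD_some, List.set_set, List.set_set, List.set_comm _ _ hcol]
    · have h : m.length ≤ i.toNat := by omega
      simp [List.set_eq_of_length_le, h]
  · by_cases hA : i.toNat < m.length
    · by_cases hB : i'.toNat < m.length
      · have hNe : i.toNat ≠ i'.toNat := by omega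
        rw [List.getElem?_set_ne hNe, List.getElem?_set_ne (Ne.symm hNe),
            List.set_comm _ _ hNe]
      · have hB' : m.length ≤ i'.toNat := by omega
        simp [List.set_eq_of_length_le, hB']
    · have hA' : m.length ≤ i.toNat := by omega
      simp [List.set_eq_of_length_le, hA']

-- carry-chain write along a fresh path is a simultaneous assignment
lemma ringWrite_eq_pairsFold (m0 : List (List Int)) :
    ∀ (path : List (Int × Int)) (m : List (List Int)) (prev : Int),
      path.Nodup → (∀ c ∈ path, 0 ≤ c.1 ∧ 0 ≤ c.2) →
      (∀ c ∈ path, pyGetCell m c.1 c.2 = pyGetCell m0 c.1 c.2) →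
      ringWrite m path prev
        = pairsFold m (path.zip (prev :: path.map (fun c => pyGetCell m0 c.1 c.2))) := by
  intro path
  induction path with
  | nil => intro m prev _ _ _; simp [ringWrite, pairsFold]
  | cons c t ih =>
    intro m prev hnd hnn hread
    simp only [List.map_cons, List.zip_cons_cons, ringWrite, pairsFold, List.foldl_cons]
    rw [hread c (by simp)]
    rw [← pairsFold]
    apply ih
    · exact hnd.of_cons
    · intro c' hc'; exact hnn c' (by simp [hc'])
    · intro c' hc'
      rw [← hread c' (by simp [hc'])]
      apply getCell_setCell_ne
      · exact (hnn c' (by simp [hc'])).1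
      · exact (hnn c' (by simp [hc'])).2
      · exact (hnn c (by simp)).1
      · exact (hnn c (by simp)).2
      · have : c' ≠ c := by
          intro h; subst h
          exact (List.nodup_cons.mp hnd).1 hc'
        intro h
        apply this
        cases c' ; cases c ; simpa [Prod.ext_iff] using h


lemma ringCoords_cons (g s : Int) (hg : 2 ≤ g) :
    ringCoords g s = ((0:Int), (0:Int)) :: (ringCoords g s).tail := by
  rw [ringCoords, PySem.List.pyRange_one_cons (by omega : (0:Int) < g)]
  simp

lemma ringPathA_split (g s : Int) (hg : 2 ≤ g) (hs : 2 ≤ s) :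
    ringPathA g s = (ringCoords g s).tail ++ [((0:Int), (0:Int))] := by
  rw [ringCoords, PySem.List.pyRange_one_cons (by omega : (0:Int) < g)]
  rw [ringPathA]
  rw [show PySem.List.pyRange (s - 2) (-1) (-1) = PySem.List.pyRange (s - 2) 0 (-1) ++ [(0:Int)] from ?_]
  · simp
  · rw [PySem.List.pyRange_neg_one_eq_reverse, PySem.List.pyRange_neg_one_eq_reverse]
    rw [show (-1:Int) + 1 = 0 from by ring, show (0:Int) + 1 = 1 from by ring]
    rw [PySem.List.pyRange_one_append 0 1 (s - 2 + 1) (by omega) (by omega)]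
    simp
    decide

lemma mem_ringCoords (g s : Int) (hg : 2 ≤ g) (hs : 2 ≤ s) :
    ∀ c ∈ ringCoords g s, (0 ≤ c.1 ∧ c.1 ≤ s - 1) ∧ (0 ≤ c.2 ∧ c.2 ≤ g - 1) := by
  intro c hc
  simp only [ringCoords, List.mem_append, List.mem_map, PySem.List.mem_pyRange_one,
    PySem.List.mem_pyRange_neg_one] at hc
  rcases hc with ((⟨j, hj, rfl⟩ | ⟨i, hi, rfl⟩) | ⟨j, hj, rfl⟩) | ⟨i, hi, rfl⟩ <;> simp <;> omega

lemma nodup_ringCoords (g s : Int) (hg : 2 ≤ g) (hs : 2 ≤ s) :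
    (ringCoords g s).Nodup := by
  have inj1 : Function.Injective (fun j : Int => ((0 : Int), j)) := by
    intro a b h; simpa using h
  have inj2 : Function.Injective (fun i : Int => (i, g - 1)) := by
    intro a b h; simpa using h
  have inj3 : Function.Injective (fun j : Int => (s - 1, j)) := by
    intro a b h; simpa using h
  have inj4 : Function.Injective (fun i : Int => (i, (0 : Int))) := by
    intro a b h; simpa using h
  have nd1 := (PySem.List.nodup_pyRange_one 0 g).map inj1
  have nd2 := (PySem.List.nodup_pyRange_one 1 s).map inj2
  have nd3 : ((PySem.List.pyRange (g - 2) (-1) (-1)).map (fun j => (s - 1, j))).Nodup := by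
    rw [PySem.List.pyRange_neg_one_eq_reverse]
    exact ((List.nodup_reverse.mpr (PySem.List.nodup_pyRange_one _ _))).map inj3
  have nd4 : ((PySem.List.pyRange (s - 2) 0 (-1)).map (fun i => (i, (0:Int)))).Nodup := by
    rw [PySem.List.pyRange_neg_one_eq_reverse]
    exact ((List.nodup_reverse.mpr (PySem.List.nodup_pyRange_one _ _))).map inj4
  have dis : ∀ (f f' : Int → Int × Int) (r r' : List Int),
      (∀ a ∈ r, ∀ b ∈ r', f a ≠ f' b) → (r.map f).Disjoint (r'.map f') := by
    intro f f' r r' h x hx hy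
    obtain ⟨a, ha, h1⟩ := List.mem_map.mp hx
    obtain ⟨b, hb, h2⟩ := List.mem_map.mp hy
    exact h a ha b hb (h1.trans h2.symm)
  have d12 := dis (fun j => ((0:Int), j)) (fun i => (i, g - 1)) (PySem.List.pyRange 0 g 1) (PySem.List.pyRange 1 s 1)
    (fun a ha b hb => by
      rw [PySem.List.mem_pyRange_one] at ha hb
      simp only [ne_eq, Prod.mk.injEq, not_and]; omega)
  have d13 := dis (fun j => ((0:Int), j)) (fun j => (s - 1, j)) (PySem.List.pyRange 0 g 1) (PySem.List.pyRange (g-2) (-1) (-1))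
    (fun a ha b hb => by
      rw [PySem.List.mem_pyRange_one] at ha
      rw [PySem.List.mem_pyRange_neg_one] at hb
      simp only [ne_eq, Prod.mk.injEq, not_and]; omega)
  have d14 := dis (fun j => ((0:Int), j)) (fun i => (i, (0:Int))) (PySem.List.pyRange 0 g 1) (PySem.List.pyRange (s-2) 0 (-1))
    (fun a ha b hb => by
      rw [PySem.List.mem_pyRange_one] at ha
      rw [PySem.List.mem_pyRange_neg_one] at hb
      simp only [ne_eq, Prod.mk.injEq, not_and]; omega)
  have d23 := dis (fun i => (i, g - 1)) (fun j => (s - 1, j)) (PySem.List.pyRange 1 s 1) (PySem.List.pyRange (g-2) (-1) (-1))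
    (fun a ha b hb => by
      rw [PySem.List.mem_pyRange_one] at ha
      rw [PySem.List.mem_pyRange_neg_one] at hb
      simp only [ne_eq, Prod.mk.injEq, not_and]; omega)
  have d24 := dis (fun i => (i, g - 1)) (fun i => (i, (0:Int))) (PySem.List.pyRange 1 s 1) (PySem.List.pyRange (s-2) 0 (-1))
    (fun a ha b hb => by
      rw [PySem.List.mem_pyRange_one] at ha
      rw [PySem.List.mem_pyRange_neg_one] at hb
      simp only [ne_eq, Prod.mk.injEq, not_and]; omega)
  have d34 := dis (fun j => (s - 1, j)) (fun i => (i, (0:Int))) (PySem.List.pyRange (g-2) (-1) (-1)) (PySem.List.pyRange (s-2) 0 (-1))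
    (fun a ha b hb => by
      rw [PySem.List.mem_pyRange_neg_one] at ha hb
      simp only [ne_eq, Prod.mk.injEq, not_and]; omega)
  rw [ringCoords]
  refine List.Nodup.append (List.Nodup.append (List.Nodup.append nd1 nd2 d12) nd3 ?_) nd4 ?_
  · rw [List.disjoint_append_left]
    exact ⟨d13, d23⟩
  · rw [List.disjoint_append_left, List.disjoint_append_left]
    exact ⟨⟨d14, d24⟩, d34⟩


lemma rotate_eq (rc : List (List Int)) (hs2 : 2 ≤ rc.length) (hg2 : 2 ≤ rc.headI.length) :
    rotateA rc = rotateB rc := by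
  have hne : rc ≠ [] := by cases rc <;> simp_all
  have hlenG : PySem.List.len (PySem.List.pyGetD rc 0 []) = (rc.headI.length : Int) := by
    cases rc with
    | nil => simp at hs2
    | cons h t => simp [PySem.List.len_eq, List.headI]
  have hlenS : PySem.List.len rc = (rc.length : Int) := PySem.List.len_eq rc
  set g : Int := (rc.headI.length : Int) with hgdef
  set s : Int := (rc.length : Int) with hsdef
  have hg : 2 ≤ g := by rw [hgdef]; exact_mod_cast hg2
  have hs : 2 ≤ s := by rw [hsdef]; exact_mod_cast hs2
  have hbounds := mem_ringCoords g s hg hs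
  have hnodupC := nodup_ringCoords g s hg hs
  have hCc := ringCoords_cons g s hg
  have hPs := ringPathA_split g s hg hs
  have hpermP : (ringPathA g s).Perm (ringCoords g s) := by
    rw [hPs]
    exact (List.perm_append_singleton _ _).trans (by rw [← hCc])
  have hnodupP : (ringPathA g s).Nodup := hpermP.nodup_iff.mpr hnodupC
  have hsubP : ∀ c ∈ ringPathA g s, c ∈ ringCoords g s := fun c hc => hpermP.mem_iff.mp hc
  -- A's side: loop = carry chain along the ring = simultaneous assignment
  have hA : rotateA rc
      = pairsFold rc ((ringPathA g s).zip
          (pyGetCell rc 0 0 :: (ringPathA g s).map (fun c => pyGetCell rc c.1 c.2))) := by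
    rw [rotateA]
    simp only [hlenG, hlenS]
    rw [rotateLoopA_eq_ringWrite, walkA_full g s hg hs]
    exact ringWrite_eq_pairsFold rc (ringPathA g s) rc (pyGetCell rc 0 0) hnodupP
      (fun c hc => ⟨((hbounds c (hsubP c hc)).1).1, ((hbounds c (hsubP c hc)).2).1⟩)
      (fun c _ => rfl)
  -- B's side is the simultaneous assignment of the rotated values
  have hVne : (ringCoords g s).map (fun c => pyGetCell rc c.1 c.2) ≠ [] := by
    rw [hCc]; simp
  have hB : rotateB rc
      = pairsFold rc ((ringCoords g s).zip
          (((ringCoords g s).map (fun c => pyGetCell rc c.1 c.2)).getLast hVne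
            :: ((ringCoords g s).map (fun c => pyGetCell rc c.1 c.2)).dropLast)) := by
    rw [rotateB]
    simp only [hlenG, hlenS]
    rw [PySem.List.pyGetD_neg_one _ _ hVne, PySem.List.slice_to_neg_one]
    rfl
  -- the two pair lists are a rotation of each other
  set c0 : Int × Int := ((0 : Int), (0 : Int)) with hc0
  set t : List (Int × Int) := (ringCoords g s).tail with htdef
  set V : List Int := (ringCoords g s).map (fun c => pyGetCell rc c.1 c.2) with hVdef
  have hVc : V = pyGetCell rc 0 0 :: t.map (fun c => pyGetCell rc c.1 c.2) := by
    rw [hVdef, hCc, htdef]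
    simp [hc0]
  have hlenV : V.length = t.length + 1 := by
    rw [hVc]; simp
  have hltV : V.dropLast.length = t.length := by
    simp [hlenV]
  have hpairsA : (ringPathA g s).zip
        (pyGetCell rc 0 0 :: (ringPathA g s).map (fun c => pyGetCell rc c.1 c.2))
      = t.zip V.dropLast ++ [(c0, V.getLast hVne)] := by
    rw [hPs]
    have hmap : (t ++ [c0]).map (fun c => pyGetCell rc c.1 c.2)
        = t.map (fun c => pyGetCell rc c.1 c.2) ++ [pyGetCell rc 0 0] := by
      simp [hc0]
    rw [hmap]
    have : pyGetCell rc 0 0 :: (t.map (fun c => pyGetCell rc c.1 c.2) ++ [pyGetCell rc 0 0])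
        = (V.dropLast ++ [V.getLast hVne]) ++ [pyGetCell rc 0 0] := by
      rw [List.dropLast_append_getLast hVne, hVc]
      simp
    rw [this, List.append_assoc]
    rw [List.zip_append (by rw [hltV])]
    simp
  have hpairsB : (ringCoords g s).zip (V.getLast hVne :: V.dropLast)
      = (c0, V.getLast hVne) :: t.zip V.dropLast := by
    rw [hCc]
    simp
  rw [hA, hB, hpairsA, hpairsB]
  -- fold over a permutation of writes to pairwise-distinct cells
  have hfstA : (t.zip V.dropLast ++ [(c0, V.getLast hVne)]).map Prod.fst = ringPathA g s := by
    rw [List.map_append, List.map_fst_zip (by rw [hltV])]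
    rw [hPs]
    simp
  have hnodupFst : ((t.zip V.dropLast ++ [(c0, V.getLast hVne)]).map Prod.fst).Nodup := by
    rw [hfstA]; exact hnodupP
  have hmemP : ∀ p ∈ t.zip V.dropLast ++ [(c0, V.getLast hVne)], p.1 ∈ ringPathA g s := by
    intro p hp
    rw [← hfstA]
    exact List.mem_map_of_mem hp
  apply List.Perm.foldl_eq' (List.perm_append_singleton _ _)
  intro x hx y hy z
  by_cases hxy : x = y
  · rw [hxy]
  · have hfstne : x.1 ≠ y.1 := by
      intro hft
      exact hxy (List.inj_on_of_nodup_map hnodupFst hx hy hft)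
    have bx := hbounds x.1 (hsubP x.1 (hmemP x hx))
    have byy := hbounds y.1 (hsubP y.1 (hmemP y hy))
    exact setCell_comm z x.1.1 x.1.2 y.1.1 y.1.2 x.2 y.2 bx.1.1 bx.2.1 byy.1.1 byy.2.1
      (by intro h; apply hfstne; rw [Prod.ext_iff] at h ⊢; simpa using h)


lemma shift_inv (rc : List (List Int)) (hne : rc ≠ []) :
    ∀ (k : Nat), k + 1 ≤ rc.length - 1 →
      ((PySem.List.pyRange 1 ((k : Int) + 1) 1).foldl
        (fun (st : List (List Int) × List Int) i =>
          let now := PySem.List.pyGetD st.1 i []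
          let m := PySem.List.pySetD st.1 i st.2
          let m := if i = PySem.List.len rc - 1 then PySem.List.pySetD m 0 now else m
          (m, now))
        (rc, PySem.List.pyGetD rc 0 []))
      = (rc.headI :: (rc.take k ++ rc.drop (k + 1)), rc.getD k []) := by
  intro k
  induction k with
  | zero =>
    intro hk
    rw [show ((0:Nat) : Int) + 1 = 1 from by norm_num, PySem.List.pyRange_one_eq_nil (by omega)]
    simp only [List.foldl_nil]
    rw [PySem.List.pyGetD_zero]
    cases rc with
    | nil => simp at hne
    | cons h t => simp
  | succ k ih =>
    intro hk
    have hk' : k + 1 ≤ rc.length - 1 := by omega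
    rw [show ((k + 1 : Nat) : Int) + 1 = ((k:Int) + 1) + 1 from by push_cast; ring]
    rw [PySem.List.pyRange_one_succ_right (by omega), List.foldl_append, ih hk']
    simp only [List.foldl_cons, List.foldl_nil]
    have hpre : (rc.headI :: rc.take k).length = k + 1 := by
      simp
      all_goals omega
    have hidx : ((k:Int) + 1).toNat = k + 1 := by omega
    have hlen : PySem.List.len rc = (rc.length : Int) := PySem.List.len_eq rc
    have hguard : ¬ ((k:Int) + 1 = PySem.List.len rc - 1) := by
      rw [hlen]; omega
    rw [PySem.List.pyGetD_of_nonneg _ _ (by omega)]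
    simp only [hguard, if_false]
    rw [PySem.List.pySetD_of_nonneg _ _ (by omega), hidx]
    have e1 : (rc.headI :: (rc.take k ++ rc.drop (k + 1))) = (rc.headI :: rc.take k) ++ rc.drop (k + 1) := by
      simp
    have hget : ((rc.headI :: rc.take k) ++ rc.drop (k + 1)).getD (k + 1) [] = rc.getD (k + 1) [] := by
      rw [List.getD_append_right _ _ _ _ (by rw [hpre])]
      rw [hpre, Nat.sub_self]
      rw [List.getD_eq_getElem?_getD, List.getElem?_drop, Nat.add_zero, ← List.getD_eq_getElem?_getD]
    have hset : ((rc.headI :: rc.take k) ++ rc.drop (k + 1)).set (k + 1) (rc.getD k [])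
        = rc.headI :: (rc.take (k + 1) ++ rc.drop (k + 2)) := by
      rw [List.set_append_right _ _ (by rw [hpre])]
      rw [hpre, Nat.sub_self]
      have hdrop : rc.drop (k + 1) = rc[k + 1] :: rc.drop (k + 2) := by
        exact List.drop_eq_getElem_cons (by omega)
      rw [hdrop]
      simp only [List.set_cons_zero]
      have htake : rc.take (k + 1) = rc.take k ++ [rc.getD k []] := by
        rw [List.take_add_one, List.getElem?_eq_getElem (by omega)]
        simp [List.getD_eq_getElem?_getD, List.getElem?_eq_getElem (show k < rc.length by omega)]
      rw [htake]
      simp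
    rw [e1, hget, hset]
  
lemma shift_eq (rc : List (List Int)) (hne : rc ≠ []) : shiftRowA rc = shiftRowB rc := by
  have hlen : PySem.List.len rc = (rc.length : Int) := PySem.List.len_eq rc
  rw [shiftRowB, PySem.List.pyGetD_neg_one _ _ hne, PySem.List.slice_to_neg_one]
  by_cases h1 : rc.length = 1
  · obtain ⟨a, rfl⟩ := List.length_eq_one_iff.mp h1
    simp [shiftRowA, PySem.List.pyRange_one_eq_nil]
  · have hn2 : 2 ≤ rc.length := by
      rcases rc with _ | ⟨a, _ | ⟨b, t⟩⟩
      · simp at hne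
      · simp at h1
      · simp
    rw [shiftRowA]
    have hr : PySem.List.pyRange 1 (PySem.List.len rc) 1
        = PySem.List.pyRange 1 (((rc.length - 2 : Nat) : Int) + 1) 1 ++ [((rc.length - 2 : Nat) : Int) + 1] := by
      rw [hlen]
      rw [show ((rc.length : Nat) : Int) = (((rc.length - 2 : Nat) : Int) + 1) + 1 from by omega]
      rw [PySem.List.pyRange_one_succ_right (by omega)]
    rw [hr, List.foldl_append, shift_inv rc hne (rc.length - 2) (by omega)]
    simp only [List.foldl_cons, List.foldl_nil]
    have hidx : (((rc.length - 2 : Nat) : Int) + 1).toNat = rc.length - 1 := by omega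
    have hguard : ((rc.length - 2 : Nat) : Int) + 1 = PySem.List.len rc - 1 := by
      rw [hlen]; omega
    rw [PySem.List.pyGetD_of_nonneg _ _ (by omega)]
    rw [if_pos hguard]
    rw [PySem.List.pySetD_of_nonneg (i := 0) _ _ (by omega),
        PySem.List.pySetD_of_nonneg _ _ (by omega), hidx]
    simp only [Int.toNat_zero]
    have hpre : (rc.headI :: rc.take (rc.length - 2)).length = rc.length - 1 := by
      simp
      all_goals omega
    have e1 : (rc.headI :: (rc.take (rc.length - 2) ++ rc.drop (rc.length - 2 + 1)))
        = (rc.headI :: rc.take (rc.length - 2)) ++ rc.drop (rc.length - 1) := by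
      rw [show rc.length - 2 + 1 = rc.length - 1 from by omega, List.cons_append]
    rw [e1]
    have hget : ((rc.headI :: rc.take (rc.length - 2)) ++ rc.drop (rc.length - 1)).getD (rc.length - 1) []
        = rc.getLast hne := by
      rw [List.getD_append_right _ _ _ _ (by rw [hpre]), hpre, Nat.sub_self,
          List.drop_length_sub_one hne]
      simp
    have hset : ((rc.headI :: rc.take (rc.length - 2)) ++ rc.drop (rc.length - 1)).set (rc.length - 1) (rc.getD (rc.length - 2) [])
        = rc.headI :: rc.take (rc.length - 1) := by
      rw [List.set_append_right _ _ (by rw [hpre]), hpre, Nat.sub_self,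
          List.drop_length_sub_one hne]
      simp only [List.set_cons_zero]
      have htake : rc.take (rc.length - 1) = rc.take (rc.length - 2) ++ [rc.getD (rc.length - 2) []] := by
        rw [show rc.length - 1 = (rc.length - 2) + 1 from by omega, List.take_add_one,
            List.getElem?_eq_getElem (by omega)]
        simp [List.getD_eq_getElem?_getD, List.getElem?_eq_getElem (show rc.length - 2 < rc.length by omega)]
      rw [htake]
      simp
    rw [hget, hset]
    rw [List.set_cons_zero, List.dropLast_eq_take]

-- write-back passes preserve the row-length profile
lemma map_length_pySetCell (m : List (List Int)) (i j v : Int) (hi : 0 ≤ i) (hj : 0 ≤ j) :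
    (pySetCell m i j v).map List.length = m.map List.length := by
  rw [pySetCell_nonneg m i j v hi hj]
  by_cases hlen : i.toNat < m.length
  · rw [List.map_set]
    have e : ((m[i.toNat]?.getD []).set j.toNat v).length = (m.map List.length)[i.toNat]'(by simpa) := by
      simp [List.getElem?_eq_getElem hlen]
    rw [e, List.set_getElem_self]
  · rw [List.set_eq_of_length_le (by omega)]

lemma map_length_pairsFold (pairs : List ((Int × Int) × Int)) :
    ∀ (m : List (List Int)), (∀ p ∈ pairs, 0 ≤ p.1.1 ∧ 0 ≤ p.1.2) →
      (pairsFold m pairs).map List.length = m.map List.length := by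
  induction pairs with
  | nil => intro m _; simp [pairsFold]
  | cons p t ih =>
    intro m hp
    rw [pairsFold, List.foldl_cons, ← pairsFold, ih _ (fun q hq => hp q (by simp [hq]))]
    exact map_length_pySetCell m p.1.1 p.1.2 p.2 (hp p (by simp)).1 (hp p (by simp)).2

-- the rectangularity invariant
def Rect2 (m : List (List Int)) : Prop :=
  2 ≤ m.length ∧ 2 ≤ m.headI.length ∧ ∀ row ∈ m, row.length = m.headI.length

lemma rect2_shiftRowB (m : List (List Int)) (h : Rect2 m) : Rect2 (shiftRowB m) := by
  obtain ⟨h1, h2, h3⟩ := h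
  have hne : m ≠ [] := by intro hh; rw [hh] at h1; simp at h1
  rw [shiftRowB, PySem.List.pyGetD_neg_one _ _ hne, PySem.List.slice_to_neg_one]
  have hlast : (m.getLast hne).length = m.headI.length := h3 _ (List.getLast_mem hne)
  refine ⟨?_, ?_, ?_⟩
  · simp only [List.length_cons, List.length_dropLast]
    omega
  · rw [List.headI_cons]
    omega
  · intro row hrow
    rw [List.headI_cons]
    rcases List.mem_cons.mp hrow with rfl | hrow'
    · rfl
    · have hm : row ∈ m := List.dropLast_subset m hrow'
      rw [h3 row hm, ← hlast]

lemma rect2_of_map_length_eq (m m' : List (List Int)) (h : Rect2 m)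
    (hmap : m'.map List.length = m.map List.length) : Rect2 m' := by
  obtain ⟨h1, h2, h3⟩ := h
  have hlen : m'.length = m.length := by
    have := congrArg List.length hmap
    simpa using this
  have hne' : m' ≠ [] := by
    intro hh
    rw [hh] at hlen
    simp at hlen
    omega
  have hmem : ∀ row ∈ m', row.length = m.headI.length := by
    intro row hrow
    have hin : row.length ∈ m.map List.length := by
      rw [← hmap]
      exact List.mem_map_of_mem hrow
    obtain ⟨r, hr, hrl⟩ := List.mem_map.mp hin
    rw [← hrl]
    exact h3 r hr
  have hh : m'.headI.length = m.headI.length := by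
    apply hmem
    rcases m' with _ | ⟨a, t⟩
    · simp at hne'
    · simp
  exact ⟨by omega, by omega, fun row hrow => by rw [hmem row hrow, hh]⟩

lemma rect2_rotateB (m : List (List Int)) (h : Rect2 m) : Rect2 (rotateB m) := by
  have h1 := h.1
  have h2 := h.2.1
  have hne : m ≠ [] := by intro hh; rw [hh] at h1; simp at h1
  have hlenG : PySem.List.len (PySem.List.pyGetD m 0 []) = (m.headI.length : Int) := by
    cases m with
    | nil => simp at h1
    | cons hd tl => simp [PySem.List.len_eq, List.headI]
  have hlenS : PySem.List.len m = (m.length : Int) := PySem.List.len_eq m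
  apply rect2_of_map_length_eq m _ h
  rw [rotateB]
  simp only [hlenG, hlenS]
  rw [← pairsFold]
  apply map_length_pairsFold
  intro p hp
  have hp1 := (List.of_mem_zip hp).1
  have := mem_ringCoords (m.headI.length : Int) (m.length : Int)
    (by exact_mod_cast h2) (by exact_mod_cast h1) p.1 hp1
  exact ⟨this.1.1, this.2.1⟩

-- the per-operation steps agree and maintain the invariants
lemma fold_eq : ∀ (ops : List String) (m : List (List Int)),
    (ops ≠ [] → m ≠ []) →
    ((∃ op ∈ ops, op ≠ "ShiftRow") → Rect2 m) →
    ops.foldl (fun m op => if op = "ShiftRow" then shiftRowA m else rotateA m) m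
      = ops.foldl (fun m op => if op = "ShiftRow" then shiftRowB m else rotateB m) m := by
  intro ops
  induction ops with
  | nil => intro m _ _; rfl
  | cons op rest ih =>
    intro m hne hrect
    have hmne : m ≠ [] := hne (by simp)
    simp only [List.foldl_cons]
    by_cases hop : op = "ShiftRow"
    · rw [if_pos hop, if_pos hop, shift_eq m hmne]
      apply ih
      · intro _
        rw [shiftRowB]
        simp
      · intro hex
        obtain ⟨o, ho, hno⟩ := hex
        exact rect2_shiftRowB m (hrect ⟨o, by simp [ho], hno⟩)
    · have hR : Rect2 m := hrect ⟨op, by simp, hop⟩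
      rw [if_neg hop, if_neg hop, rotate_eq m hR.1 hR.2.1]
      apply ih
      · intro _
        have hr2 := (rect2_rotateB m hR).1
        intro hh
        rw [hh] at hr2
        simp at hr2
      · intro _
        exact rect2_rotateB m hR

-- ===== VERDICT (by name: the statement is the Claim_ definition above) =====
theorem solution_spec : Claim_equal_solution := by
  unfold Claim_equal_solution
  intro rc operations _hdom hpre
  unfold Spec_solution solution solution_alt
  exact fold_eq operations rc hpre.1 hpre.2
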